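-- pv_equiv track=rewrite | github.com/StanislawPodr/studia | laby/systemySem2/laby2/simulation.py | FCFS
-- ===== SOURCE A (Python) =====
-- def FCFS(input : list, startingPoint, max=200, sum=0):
--     Y = []
--     X = input[:]
--     X.insert(0, startingPoint[0])
--     current = startingPoint[0]
--     for x in X:
--         sum += abs(current - x)
--         Y.append(sum)
--         current = x
--     return X, Y, sum
-- ===== SOURCE B (Python) =====
-- def _seek(X, i):
--     # total head movement along the first i gaps of the visiting order X
--     t = 0
--     for j in range(i):
--         t += abs(X[j + 1] - X[j])
--     return t
--
-- def FCFS(input: list, startingPoint, max=200, sum=0):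
--     X = [startingPoint[0]] + input
--     Y = [sum + _seek(X, i) for i in range(len(X))]
--     return X, Y, sum + _seek(X, len(X) - 1)
-- ===== Notes on version B (the rewrite author's own statement) =====
-- stated objective: alternative
-- what changed: Replaces A's single state-carrying pass (running current position and running sum appended as it goes) by a per-index closed form: each Y[i] is computed independently as sum plus the seek distance over the first i gaps, with no accumulator threaded between outputs; B trades speed (O(n^2)) for this index-wise formulation.
import Mathlib
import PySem

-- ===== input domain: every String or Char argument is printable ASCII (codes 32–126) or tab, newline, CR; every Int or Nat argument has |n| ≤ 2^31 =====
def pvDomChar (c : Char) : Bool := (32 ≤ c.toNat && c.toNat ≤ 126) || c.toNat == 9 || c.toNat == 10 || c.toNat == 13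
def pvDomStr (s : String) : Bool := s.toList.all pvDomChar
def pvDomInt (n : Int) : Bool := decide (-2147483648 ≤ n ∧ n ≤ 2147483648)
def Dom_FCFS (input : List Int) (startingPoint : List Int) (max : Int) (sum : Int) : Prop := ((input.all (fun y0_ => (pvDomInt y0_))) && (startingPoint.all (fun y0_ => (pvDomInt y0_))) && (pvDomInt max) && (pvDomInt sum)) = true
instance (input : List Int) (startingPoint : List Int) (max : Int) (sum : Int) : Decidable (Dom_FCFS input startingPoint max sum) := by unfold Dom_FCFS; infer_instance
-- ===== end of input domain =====

-- B replaces A's state-carrying pass by a per-index closed form: each Y[i] is computed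
-- independently as sum + seek distance over the first i gaps (no accumulator across outputs);
-- B trades speed (quadratic) for this formulation. A copies `input`, so no caller-visible mutation.

-- ===== PORT A =====
-- loop body: sum += abs(current - x); Y.append(sum); current = x   (state = (Y, sum, current))
def FCFSstepA (st : List Int × Int × Int) (x : Int) : List Int × Int × Int :=
  (st.1 ++ [st.2.1 + |st.2.2 - x|], st.2.1 + |st.2.2 - x|, x)

def FCFS (input : List Int) (startingPoint : List Int) (max : Int) (sum : Int) : List Int × List Int × Int :=
  match PySem.List.pyGet? startingPoint 0 with
  | none => ([], [], 0)   -- startingPoint[0] raises IndexError; excluded by Pre_FCFS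
  | some sp =>
    let X := sp :: input               -- X = input[:]; X.insert(0, sp)
    let r := X.foldl FCFSstepA ([], sum, sp)
    (X, r.1, r.2.1)

-- ===== PORT B =====
-- _seek: for j in range(i): t += abs(X[j+1] - X[j]); called only with 0 ≤ i < len(X),
-- so every index is in range and List.getD is exact for Python's X[j].
def seekB (X : List Int) (i : Nat) : Int :=
  (List.range i).foldl (fun t j => t + |X.getD (j + 1) 0 - X.getD j 0|) 0

def FCFS_alt (input : List Int) (startingPoint : List Int) (max : Int) (sum : Int) : List Int × List Int × Int :=
  match PySem.List.pyGet? startingPoint 0 with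
  | none => ([], [], 0)   -- startingPoint[0] raises IndexError; excluded by Pre_FCFS
  | some sp =>
    let X := sp :: input
    let Y := (List.range X.length).map (fun i => sum + seekB X i)
    (X, Y, sum + seekB X (X.length - 1))

-- ===== PRECONDITION & SPEC =====
-- Pre_ excludes only empty startingPoint, on which both Pythons raise IndexError.
def Pre_FCFS (input : List Int) (startingPoint : List Int) (max : Int) (sum : Int) : Prop :=
  startingPoint ≠ []
instance (input : List Int) (startingPoint : List Int) (max : Int) (sum : Int) : Decidable (Pre_FCFS input startingPoint max sum) := by unfold Pre_FCFS; infer_instance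

def pvWitness_FCFS : List Int × List Int × Int × Int := ([1, 5, 2], [3], 200, 0)

def Spec_FCFS (input : List Int) (startingPoint : List Int) (max : Int) (sum : Int) (out : List Int × List Int × Int) : Prop := out = FCFS_alt input startingPoint max sum
instance (input : List Int) (startingPoint : List Int) (max : Int) (sum : Int) (out : List Int × List Int × Int) : Decidable (Spec_FCFS input startingPoint max sum out) := by unfold Spec_FCFS; infer_instance

-- ===== CLAIM (what is proved, stated in full; the proofs are below) =====
def Claim_equal_FCFS : Prop := ∀ (input : List Int) (startingPoint : List Int) (max : Int) (sum : Int), Dom_FCFS input startingPoint max sum → Pre_FCFS input startingPoint max sum → Spec_FCFS input startingPoint max sum (FCFS input startingPoint max sum)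

-- ===== LEMMAS AND PROOFS =====

-- canonical descriptions of A's loop output
def ysA (cur s : Int) : List Int → List Int
  | [] => []
  | x :: xs => (s + |cur - x|) :: ysA x (s + |cur - x|) xs

def tdA (cur : Int) : List Int → Int
  | [] => 0
  | x :: xs => |cur - x| + tdA x xs

lemma foldA_eq : ∀ (l : List Int) (Y : List Int) (s cur : Int),
    ((l.foldl FCFSstepA (Y, s, cur)).1, (l.foldl FCFSstepA (Y, s, cur)).2.1)
      = (Y ++ ysA cur s l, s + tdA cur l) := by
  intro l
  induction l with
  | nil => intro Y s cur; simp [ysA, tdA]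
  | cons x xs ih =>
    intro Y s cur
    simp only [List.foldl_cons, FCFSstepA, ysA, tdA]
    rw [ih]
    simp [List.append_assoc, add_assoc]

lemma seekB_succ (X : List Int) (i : Nat) :
    seekB X (i + 1) = seekB X i + |X.getD (i + 1) 0 - X.getD i 0| := by
  simp [seekB, List.range_succ]

lemma seekB_cons : ∀ (i : Nat) (cur : Int) (l : List Int),
    seekB (cur :: l) (i + 1) = |l.getD 0 0 - cur| + seekB l i := by
  intro i
  induction i with
  | zero =>
    intro cur l
    simp [seekB, List.range_succ]
  | succ i ih =>
    intro cur l
    rw [seekB_succ (cur :: l) (i + 1), ih, seekB_succ l i]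
    simp [add_assoc]

lemma map_seekB_eq_ysA : ∀ (l : List Int) (cur s : Int),
    (List.range l.length).map (fun i => s + seekB (cur :: l) (i + 1)) = ysA cur s l := by
  intro l
  induction l with
  | nil => intro cur s; simp [ysA]
  | cons x xs ih =>
    intro cur s
    rw [List.length_cons, List.range_succ_eq_map, List.map_cons, List.map_map]
    simp only [ysA]
    congr 1
    · rw [seekB_cons 0 cur (x :: xs)]
      simp [seekB, abs_sub_comm]
    · rw [← ih x (s + |cur - x|)]
      apply List.map_congr_left
      intro i _
      simp only [Function.comp_apply]
      rw [seekB_cons (i + 1) cur (x :: xs)]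
      simp [abs_sub_comm, add_assoc]

lemma tdA_eq_seekB : ∀ (l : List Int) (cur : Int), tdA cur l = seekB (cur :: l) l.length := by
  intro l
  induction l with
  | nil => intro cur; simp [tdA, seekB]
  | cons x xs ih =>
    intro cur
    simp only [tdA, List.length_cons]
    rw [seekB_cons xs.length cur (x :: xs), ← ih x]
    simp [abs_sub_comm]

-- ===== VERDICT (by name: the statement is the Claim_ definition above) =====
theorem FCFS_spec : Claim_equal_FCFS := by
  intro input startingPoint max sum _ hpre
  unfold Spec_FCFS FCFS FCFS_alt
  cases startingPoint with
  | nil => exact absurd rfl hpre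
  | cons sp rest =>
    simp only [PySem.List.pyGet?, PySem.List.pyIdx?]
    norm_num
    have hA := foldA_eq (sp :: input) [] sum sp
    simp only [List.foldl_cons, List.nil_append] at hA
    have h1 := congrArg Prod.fst hA
    have h2 := congrArg Prod.snd hA
    dsimp at h1 h2
    constructor
    · rw [h1, List.range_succ_eq_map, List.map_cons, List.map_map]
      simp only [ysA, sub_self, abs_zero, add_zero]
      congr 1
      · simp [seekB]
      · rw [← map_seekB_eq_ysA input sp sum]
        apply List.map_congr_left
        intro i _
        simp [Function.comp]
    · rw [h2]
      simp only [tdA, sub_self, abs_zero, zero_add]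
      rw [tdA_eq_seekB input sp]
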